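-- pv_equiv track=rewrite | github.com/MrBrantCode/unitest_baseline | mut_generate/mist_train_cf/cf_98958/solution.py | find_equal_value_pair
-- ===== SOURCE A (Python) =====
-- def find_equal_value_pair(strings):
--     """
--     Returns a tuple containing the first pair of strings found whose values are equal based on the sum of their ASCII values.
--     If no such pair exists, returns None.
--
--     Args:
--         strings (list): A list of alphanumeric strings.
--
--     Returns:
--         tuple or None: A tuple containing the first pair of strings with equal ASCII sum, or None if no pair exists.
--     """
--     ascii_sum = {}
--     for string in strings:
--         ascii_sum_for_string = sum(ord(char) for char in string)
--         if ascii_sum_for_string in ascii_sum: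
--             return (ascii_sum[ascii_sum_for_string], string)
--         ascii_sum[ascii_sum_for_string] = string
--     return None
-- ===== SOURCE B (Python) =====
-- def find_equal_value_pair(strings):
--     prefix = []
--     for s in strings:
--         t = sum(map(ord, s))
--         for p in prefix:
--             if sum(map(ord, p)) == t:
--                 return (p, s)
--         prefix.append(s)
--     return None
-- ===== Notes on version B (the rewrite author's own statement) =====
-- stated objective: simpler
-- what changed: Replaced the ascii-sum dict single pass with a plain nested loop that rescans the already-seen prefix (recomputing sums) and returns the first earlier string with the same sum; no dict is maintained.
import Mathlib
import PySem

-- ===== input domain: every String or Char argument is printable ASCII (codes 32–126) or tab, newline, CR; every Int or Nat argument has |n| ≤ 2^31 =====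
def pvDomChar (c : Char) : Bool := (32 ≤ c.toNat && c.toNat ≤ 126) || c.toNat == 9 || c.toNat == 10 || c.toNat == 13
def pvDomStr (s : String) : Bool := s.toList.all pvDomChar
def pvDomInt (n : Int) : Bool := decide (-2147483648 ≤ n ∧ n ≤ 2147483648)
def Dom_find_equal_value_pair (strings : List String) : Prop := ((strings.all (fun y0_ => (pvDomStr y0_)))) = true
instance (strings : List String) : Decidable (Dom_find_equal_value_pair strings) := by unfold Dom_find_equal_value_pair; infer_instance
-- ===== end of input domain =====

-- Header: B replaces A's ascii-sum dict single pass with a nested rescan of the seen prefix (objective: simpler); same return value proved equal.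
-- ===== PORT A =====
def pvOrdSumA (s : String) : Int :=
  s.toList.foldl (fun acc c => acc + (c.toNat : Int)) 0

def pvGoA (ascii_sum : PySem.Dict Int String) : List String → Option (String × String)
  | [] => none
  | s :: rest =>
    let v := pvOrdSumA s
    match ascii_sum.get? v with
    | some prev => some (prev, s)
    | none => pvGoA (ascii_sum.insert v s) rest

def find_equal_value_pair (strings : List String) : Option (String × String) :=
  pvGoA PySem.Dict.empty strings

-- ===== PORT B =====
def pvOrdSumB (s : String) : Int :=
  (s.toList.map (fun c => (c.toNat : Int))).sum

-- inner "for p in prefix" loop of B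
def pvScanB (t : Int) : List String → Option String
  | [] => none
  | p :: ps => if pvOrdSumB p == t then some p else pvScanB t ps

def pvGoB (pre : List String) : List String → Option (String × String)
  | [] => none
  | s :: rest =>
    let t := pvOrdSumB s
    match pvScanB t pre with
    | some p => some (p, s)
    | none => pvGoB (pre ++ [s]) rest

def find_equal_value_pair_alt (strings : List String) : Option (String × String) :=
  pvGoB [] strings


-- ===== PRECONDITION & SPEC =====
def Spec_find_equal_value_pair (strings : List String) (out : Option (String × String)) : Prop := out = find_equal_value_pair_alt strings
instance (strings : List String) (out : Option (String × String)) : Decidable (Spec_find_equal_value_pair strings out) := by unfold Spec_find_equal_value_pair; infer_instance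

-- ===== CLAIM (what is proved, stated in full; the proofs are below) =====
def Claim_equal_find_equal_value_pair : Prop := ∀ (strings : List String), Dom_find_equal_value_pair strings → Spec_find_equal_value_pair strings (find_equal_value_pair strings)

-- ===== LEMMAS AND PROOFS =====
theorem pvOrdSum_eq (s : String) : pvOrdSumA s = pvOrdSumB s := by
  simp [pvOrdSumA, pvOrdSumB, List.sum_eq_foldl, List.foldl_map]

theorem pvScanB_append (t : Int) (xs : List String) (s : String) :
    pvScanB t (xs ++ [s]) =
      match pvScanB t xs with
      | some p => some p
      | none => if pvOrdSumB s == t then some s else none := by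
  induction xs with
  | nil => simp [pvScanB]
  | cons x xs ih =>
      by_cases h : pvOrdSumB x == t <;> simp [pvScanB, h, ih]

theorem pvGo_eq (rest : List String) (d : PySem.Dict Int String) (pre : List String)
    (hinv : ∀ v : Int, d.get? v = pvScanB v pre) :
    pvGoA d rest = pvGoB pre rest := by
  induction rest generalizing d pre with
  | nil => rfl
  | cons s rest ih =>
      simp only [pvGoA, pvGoB]
      rw [pvOrdSum_eq, hinv (pvOrdSumB s)]
      cases h : pvScanB (pvOrdSumB s) pre with
      | some p => rfl
      | none =>
          apply ih
          intro v
          rw [PySem.Dict.get?_insert, pvScanB_append, ← hinv v]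
          by_cases hv : v = pvOrdSumB s
          · subst hv; rw [hinv (pvOrdSumB s), h]; simp
          · rw [if_neg hv]
            cases d.get? v with
            | some p => rfl
            | none => simp [Ne.symm hv]

-- ===== VERDICT (by name: the statement is the Claim_ definition above) =====
theorem find_equal_value_pair_spec : Claim_equal_find_equal_value_pair := by
  intro strings _
  unfold Spec_find_equal_value_pair find_equal_value_pair find_equal_value_pair_alt
  exact pvGo_eq strings PySem.Dict.empty [] (fun v => by simp [PySem.Dict.get?_empty, pvScanB])
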